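-- pv_equiv track=rewrite | github.com/AaronWendell/MIS3640 | Session 09/Exercise2.py | is_abecedarian_recursive
-- ===== SOURCE A (Python) =====
-- def is_abecedarian_recursive(word):
--     """
--     returns True if the letters in a word appear in alphabetical order, performed recursively
--     (double letters are ok).
--     """
--     if len(word) == 1:
--         return True
--     word = word.lower()
--
--     if ord(word[0]) <= ord(word[1]):
--         return is_abecedarian_recursive(word[1:])
--     else:
--         return False
-- ===== SOURCE B (Python) =====
-- def is_abecedarian_recursive(word):
--     """
--     returns True if the letters in a word appear in alphabetical order
--     (double letters are ok) -- single iterative pass instead of recursion with slicing.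
--     """
--     if len(word) == 1:
--         return True
--     w = word.lower()
--     prev = w[0]
--     for c in w[1:]:
--         if ord(prev) > ord(c):
--             return False
--         prev = c
--     return True
-- ===== Notes on version B (the rewrite author's own statement) =====
-- stated objective: simpler
-- what changed: Replaced the recursion that re-lowers and re-slices the string at every step with a single iterative pass keeping only the previous character, O(n) instead of O(n^2) slicing.
import Mathlib
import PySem

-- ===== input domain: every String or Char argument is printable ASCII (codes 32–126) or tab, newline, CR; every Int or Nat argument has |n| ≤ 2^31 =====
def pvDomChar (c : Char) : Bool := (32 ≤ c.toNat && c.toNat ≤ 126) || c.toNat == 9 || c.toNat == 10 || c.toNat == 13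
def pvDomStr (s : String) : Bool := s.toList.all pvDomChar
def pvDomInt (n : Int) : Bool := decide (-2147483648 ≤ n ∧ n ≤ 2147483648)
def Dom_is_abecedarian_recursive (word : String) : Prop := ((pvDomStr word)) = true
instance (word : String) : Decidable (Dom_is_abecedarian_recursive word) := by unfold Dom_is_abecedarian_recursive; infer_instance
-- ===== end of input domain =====

-- B is a single iterative pass (lower once, compare neighbours) instead of A's recursion
-- that re-lowers and re-slices the remainder at every step; return values proved equal on
-- every non-empty word (both raise IndexError on "").

-- ===== PORT A =====
-- A's recursion, on the character-list side (PySem.Chars.len s = s.toList.length).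
-- 'word[1:]' of the lowered list c0 :: c1 :: rest is c1 :: rest (PySem.List.slice drop-1 form).
def pvARec (cs : List Char) : Bool :=
  if cs.length == 1 then true
  else
    match h : PySem.Chars.lower cs with
    | [] => false          -- Python: word[0] raises IndexError here (empty word; outside Pre_)
    | [_] => false         -- unreachable: lower preserves length, and the guard ruled out length 1
    | c0 :: c1 :: rest =>
      if c0.toNat ≤ c1.toNat then pvARec (c1 :: rest) else false
termination_by cs.length
decreasing_by
  have hl : (PySem.Chars.lower cs).length = cs.length := by
    simp [PySem.Chars.lower]
  rw [h] at hl
  simp at hl ⊢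
  omega

def is_abecedarian_recursive (word : String) : Bool := pvARec word.toList

-- ===== PORT B =====
-- the 'for c in w[1:]' loop with accumulator prev
def pvBLoop (prev : Char) : List Char → Bool
  | [] => true
  | c :: cs => if prev.toNat > c.toNat then false else pvBLoop c cs

def is_abecedarian_recursive_alt (word : String) : Bool :=
  if word.toList.length == 1 then true
  else
    match PySem.Chars.lower word.toList with
    | [] => false          -- Python: prev = w[0] raises IndexError here (empty word; outside Pre_)
    | p :: rest => pvBLoop p rest

-- ===== PRECONDITION & SPEC =====
-- Pre_ excludes only the empty string, on which both A and B raise IndexError (word[0]).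
def Pre_is_abecedarian_recursive (word : String) : Prop := word.toList ≠ []
instance (word : String) : Decidable (Pre_is_abecedarian_recursive word) := by unfold Pre_is_abecedarian_recursive; infer_instance
def pvWitness_is_abecedarian_recursive : String := "abc"

def Spec_is_abecedarian_recursive (word : String) (out : Bool) : Prop := out = is_abecedarian_recursive_alt word
instance (word : String) (out : Bool) : Decidable (Spec_is_abecedarian_recursive word out) := by unfold Spec_is_abecedarian_recursive; infer_instance

-- ===== CLAIM (what is proved, stated in full; the proofs are below) =====
def Claim_equal_is_abecedarian_recursive : Prop := ∀ (word : String), Dom_is_abecedarian_recursive word → Pre_is_abecedarian_recursive word → Spec_is_abecedarian_recursive word (is_abecedarian_recursive word)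

-- ===== LEMMAS AND PROOFS =====

theorem lowerChar_idem (c : Char) : PySem.Chars.lowerChar (PySem.Chars.lowerChar c) = PySem.Chars.lowerChar c := by
  unfold PySem.Chars.lowerChar PySem.Chars.isupper
  by_cases h : 'A' ≤ c ∧ c ≤ 'Z'
  · have h0 : 65 ≤ c.toNat := h.1
    have h1 : c.toNat ≤ 90 := h.2
    simp only [h.1, h.2, decide_true, Bool.and_self, if_true]
    have hvalid : (c.toNat + 32).isValidChar := Or.inl (by omega)
    have hv : (Char.ofNat (c.toNat + 32)).toNat = c.toNat + 32 := by
      simp [Char.ofNat, hvalid]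
    have : ¬ ('A' ≤ Char.ofNat (c.toNat + 32) ∧ Char.ofNat (c.toNat + 32) ≤ 'Z') := by
      intro ⟨ha, hb⟩
      have hb' : (Char.ofNat (c.toNat + 32)).toNat ≤ 90 := hb
      omega
    rcases not_and_or.mp this with h' | h' <;> simp [h']
  · rcases not_and_or.mp h with h' | h' <;> simp [h']

-- the alt computation, as a function of the character list
def pvBList (cs : List Char) : Bool :=
  if cs.length == 1 then true
  else
    match PySem.Chars.lower cs with
    | [] => false
    | p :: rest => pvBLoop p rest

theorem lower_of_lowered {cs : List Char} {ds : List Char}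
    (h : ds.Sublist (PySem.Chars.lower cs)) : PySem.Chars.lower ds = ds := by
  unfold PySem.Chars.lower at *
  have : ∀ x ∈ ds, PySem.Chars.lowerChar x = x := by
    intro x hx
    obtain ⟨y, _, rfl⟩ := List.mem_map.mp (h.subset hx)
    exact lowerChar_idem y
  exact (List.map_congr_left this).trans (List.map_id _)

theorem length_lower (cs : List Char) : (PySem.Chars.lower cs).length = cs.length := by
  simp [PySem.Chars.lower]

theorem pvARec_eq_pvBList (cs : List Char) : pvARec cs = pvBList cs := by
  fun_induction pvARec cs with
  | case1 cs h1 => simp [pvBList, h1]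
  | case2 cs h1 h => simp [pvBList, h1, h]
  | case3 cs h1 x h =>
    exfalso
    have := length_lower cs
    rw [h] at this
    simp at this h1
    omega
  | case4 cs h1 c0 c1 rest h hle ih =>
    have hlow : PySem.Chars.lower (c1 :: rest) = c1 :: rest := by
      apply lower_of_lowered (cs := cs)
      rw [h]; exact (List.sublist_cons_self _ _)
    have hgt : ¬ c0.toNat > c1.toNat := by omega
    rw [ih]
    simp only [pvBList, h1, h]
    cases rest with
    | nil => simp [pvBLoop, hgt]
    | cons d ds => simp [hlow, pvBLoop, hgt]
  | case5 cs h1 c0 c1 rest h hle =>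
    simp only [pvBList, h1, h]
    simp [pvBLoop]
    omega

-- ===== VERDICT (by name: the statement is the Claim_ definition above) =====
theorem is_abecedarian_recursive_spec : Claim_equal_is_abecedarian_recursive := by
  intro word _ _
  unfold Spec_is_abecedarian_recursive is_abecedarian_recursive is_abecedarian_recursive_alt
  rw [pvARec_eq_pvBList]
  rfl
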